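-- pv_equiv track=rewrite | github.com/ShinWon-Chul/AlgorithmWithPython | programmers/연습문제/level2/JadenCase 문자열 만들기.py | solution
-- ===== SOURCE A (Python) =====
-- def solution(s):
--     answer = ''
--     s = ' ' + s
--     n = len(s)
--     for i in range(1, n):
--         if not s[i].isdigit() and s[i-1] == ' ':
--             answer += s[i].upper()
--         else:
--             answer += s[i].lower()
--     return answer
-- ===== SOURCE B (Python) =====
-- def solution(s):
--     return ' '.join(w.capitalize() for w in s.split(' '))
-- ===== Notes on version B (the rewrite author's own statement) =====
-- stated objective: simpler
-- what changed: Replaced the index-based character scan that tracks the previous character (with a prepended sentinel space) and grows the answer by repeated string +=, by a one-line tokenize-then-map: split on the literal space, capitalize() each token (exact because a digit's upper() is itself, making A's isdigit guard a no-op), and rejoin with ' '.join.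
import Mathlib
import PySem

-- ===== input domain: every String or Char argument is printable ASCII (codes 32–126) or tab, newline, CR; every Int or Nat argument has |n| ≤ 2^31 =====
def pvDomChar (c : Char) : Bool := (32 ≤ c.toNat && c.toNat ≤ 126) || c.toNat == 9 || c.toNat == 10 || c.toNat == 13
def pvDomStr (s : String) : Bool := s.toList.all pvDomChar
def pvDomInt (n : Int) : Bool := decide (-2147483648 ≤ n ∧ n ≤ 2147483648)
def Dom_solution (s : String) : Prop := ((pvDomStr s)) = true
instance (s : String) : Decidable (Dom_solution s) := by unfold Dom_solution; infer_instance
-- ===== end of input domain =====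

-- B replaces A's previous-character index scan by split-on-space / capitalize each token / rejoin (simpler, same cost).

-- ===== PORT A =====
def solution (s : String) : String :=
  let s' : List Char := ' ' :: s.toList                     -- s = ' ' + s
  let n : Int := (s'.length : Int)                           -- n = len(s)
  let answer : List Char :=
    (PySem.List.pyRange 1 n 1).foldl (fun answer i =>
      let c := PySem.List.pyGetD s' i ' '                    -- s[i]   (in range for i in range(1, n))
      let p := PySem.List.pyGetD s' (i - 1) ' '              -- s[i-1] (in range likewise)
      if !PySem.Chars.isdigit c && p == ' ' then
        answer ++ [PySem.Chars.upperChar c]                  -- answer += s[i].upper()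
      else
        answer ++ [PySem.Chars.lowerChar c]) []              -- answer += s[i].lower()
  String.mk answer

-- ===== PORT B =====
-- w.capitalize(): first char upper-cased, rest lower-cased (exact on the ASCII domain, where title-case = upper-case)
def pvCapitalize (w : List Char) : List Char :=
  match w with
  | [] => []
  | c :: rest => PySem.Chars.upperChar c :: PySem.Chars.lower rest

def solution_alt (s : String) : String :=
  String.mk (PySem.Chars.join [' '] ((PySem.Chars.splitOn s.toList [' ']).map pvCapitalize))

-- ===== PRECONDITION & SPEC =====
def Spec_solution (s : String) (out : String) : Prop := out = solution_alt s
instance (s : String) (out : String) : Decidable (Spec_solution s out) := by unfold Spec_solution; infer_instance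

-- ===== CLAIM (what is proved, stated in full; the proofs are below) =====
def Claim_equal_solution : Prop := ∀ (s : String), Dom_solution s → Spec_solution s (solution s)

-- ===== LEMMAS AND PROOFS =====

-- A's loop as a structural scan carrying "previous char was a space"
def pvScan : Bool → List Char → List Char
  | _, [] => []
  | b, c :: cs =>
    (if b && !PySem.Chars.isdigit c then PySem.Chars.upperChar c else PySem.Chars.lowerChar c)
      :: pvScan (c == ' ') cs

-- split on a single literal space, with the current (still open) token accumulated
def pvMsp : List Char → List Char → List (List Char)
  | pre, [] => [pre]
  | pre, c :: rest => if c = ' ' then pre :: pvMsp [] rest else pvMsp (pre ++ [c]) rest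

theorem pvMsp_ne_nil (cs : List Char) : ∀ pre, pvMsp pre cs ≠ [] := by
  induction cs with
  | nil => intro pre; simp [pvMsp]
  | cons c rest ih => intro pre; by_cases hc : c = ' ' <;> simp [pvMsp, hc, ih]

theorem pv_go_space (fuel : Nat) : ∀ (l cur : List Char) (acc : List (List Char)), l.length < fuel →
    PySem.Chars.splitOn.go [' '] fuel l cur acc = acc.reverse ++ pvMsp cur.reverse l := by
  induction fuel with
  | zero => intro l cur acc h; omega
  | succ f ih =>
    intro l cur acc h
    cases l with
    | nil => simp [PySem.Chars.splitOn.go, pvMsp]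
    | cons c rest =>
      by_cases hc : c = ' '
      · subst hc
        simp only [PySem.Chars.splitOn.go]
        rw [if_pos (by simp [List.isPrefixOf])]
        rw [ih (List.drop [' '].length (' ' :: rest)) [] (cur.reverse :: acc)
              (by simp at h ⊢; omega)]
        simp [pvMsp]
      · have hpre : ([' '] : List Char).isPrefixOf (c :: rest) = false := by
          simp [List.isPrefixOf]; exact fun h' => hc h'.symm
        simp only [PySem.Chars.splitOn.go]
        rw [if_neg (by simp [hpre]), ih rest (c :: cur) acc (by simp at h ⊢; omega)]
        simp [pvMsp, hc]

theorem pv_splitOn_space (cs : List Char) :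
    PySem.Chars.splitOn cs [' '] = pvMsp [] cs := by
  unfold PySem.Chars.splitOn
  simpa using pv_go_space (cs.length + 1) cs [] [] (by omega)

theorem pv_digit_upper_eq_lower (c : Char) (h : PySem.Chars.isdigit c = true) :
    PySem.Chars.upperChar c = PySem.Chars.lowerChar c := by
  simp [PySem.Chars.isdigit, Char.le_def, UInt32.le_iff_toNat_le] at h
  have h1 : PySem.Chars.islower c = false := by
    simp [PySem.Chars.islower, Char.le_def, UInt32.le_iff_toNat_le]; omega
  have h2 : PySem.Chars.isupper c = false := by
    simp [PySem.Chars.isupper, Char.le_def, UInt32.le_iff_toNat_le]; omega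
  simp [PySem.Chars.upperChar, PySem.Chars.lowerChar, h1, h2]

theorem pv_cap_append (pre : List Char) (c : Char) :
    pvCapitalize (pre ++ [c]) =
      if pre.isEmpty then [PySem.Chars.upperChar c]
      else pvCapitalize pre ++ [PySem.Chars.lowerChar c] := by
  cases pre with
  | nil => simp [pvCapitalize, PySem.Chars.lower]
  | cons p ps => simp [pvCapitalize, PySem.Chars.lower]

-- the main bridge: join of the capitalized tokens equals A's scan
theorem pv_join_msp (cs : List Char) : ∀ (pre : List Char),
    PySem.Chars.join [' '] ((pvMsp pre cs).map pvCapitalize) =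
      pvCapitalize pre ++ pvScan pre.isEmpty cs := by
  induction cs with
  | nil => intro pre; simp [pvMsp, pvScan, PySem.Chars.join_singleton]
  | cons c rest ih =>
    intro pre
    by_cases hc : c = ' '
    · subst hc
      obtain ⟨x, L', hx⟩ := List.exists_cons_of_ne_nil (pvMsp_ne_nil rest [])
      have : pvMsp pre (' ' :: rest) = pre :: pvMsp [] rest := by simp [pvMsp]
      rw [this, List.map_cons, hx, List.map_cons, PySem.Chars.join_cons_cons,
          ← List.map_cons, ← hx, ih []]
      have hu : PySem.Chars.upperChar ' ' = ' ' := by decide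
      have hl : PySem.Chars.lowerChar ' ' = ' ' := by decide
      cases hb : pre.isEmpty <;>
        simp [pvScan, pvCapitalize, hu, hl, List.append_assoc]
    · have : pvMsp pre (c :: rest) = pvMsp (pre ++ [c]) rest := by simp [pvMsp, hc]
      rw [this, ih (pre ++ [c])]
      have hne : (pre ++ [c]).isEmpty = false := by simp
      rw [hne, pv_cap_append]
      have hcb : (c == ' ') = false := by simpa using hc
      cases hb : pre.isEmpty
      · simp [pvScan, hcb, List.append_assoc]
      · have hp : pre = [] := by simpa [List.isEmpty_iff] using hb
        subst hp
        by_cases hd : PySem.Chars.isdigit c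
        · simp [pvScan, hcb, hd, pvCapitalize, pv_digit_upper_eq_lower c hd]
        · simp [pvScan, hcb, hd, pvCapitalize]

-- A's indexed loop over ' ' + s, peeled one position at a time
theorem pv_loopA (rest : List Char) : ∀ (pre : List Char) (p : Char) (ans : List Char),
    (PySem.List.pyRange ((pre.length + 1 : Nat) : Int) (((pre ++ p :: rest).length : Nat) : Int) 1).foldl
      (fun answer i =>
        let c := PySem.List.pyGetD (pre ++ p :: rest) i ' '
        let q := PySem.List.pyGetD (pre ++ p :: rest) (i - 1) ' '
        if !PySem.Chars.isdigit c && q == ' ' then answer ++ [PySem.Chars.upperChar c]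
        else answer ++ [PySem.Chars.lowerChar c]) ans
      = ans ++ pvScan (p == ' ') rest := by
  induction rest with
  | nil =>
    intro pre p ans
    rw [PySem.List.pyRange_one_eq_nil (by simp)]
    simp [pvScan]
  | cons c rest' ih =>
    intro pre p ans
    rw [PySem.List.pyRange_one_cons (by push_cast; simp)]
    rw [List.foldl_cons]
    have hc : PySem.List.pyGetD (pre ++ p :: c :: rest') ((pre.length + 1 : Nat) : Int) ' ' = c := by
      rw [PySem.List.pyGetD_natCast]
      rw [List.getD_eq_getElem?_getD, List.getElem?_append_right (by omega)]
      simp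
    have hq : PySem.List.pyGetD (pre ++ p :: c :: rest') (((pre.length + 1 : Nat) : Int) - 1) ' ' = p := by
      have : (((pre.length + 1 : Nat) : Int) - 1) = ((pre.length : Nat) : Int) := by push_cast; ring
      rw [this, PySem.List.pyGetD_natCast]
      rw [List.getD_eq_getElem?_getD, List.getElem?_append_right (by omega)]
      simp
    simp only [hc, hq]
    have harr : pre ++ p :: c :: rest' = (pre ++ [p]) ++ c :: rest' := by simp
    have hidx : ((pre.length + 1 : Nat) : Int) + 1 = (((pre ++ [p]).length + 1 : Nat) : Int) := by
      push_cast [List.length_append, List.length_cons, List.length_nil]; ring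
    rw [harr, hidx, ih (pre ++ [p]) c _]
    cases (p == ' ') <;> by_cases hd : PySem.Chars.isdigit c <;>
      simp [pvScan, hd, List.append_assoc]

-- ===== VERDICT (by name: the statement is the Claim_ definition above) =====
theorem solution_spec : Claim_equal_solution := by
  intro s _
  unfold Spec_solution solution solution_alt
  rw [pv_splitOn_space, pv_join_msp]
  have h := pv_loopA s.toList [] ' ' []
  simp only [List.nil_append, List.length_nil] at h
  rw [show (((0 + 1 : Nat)) : Int) = 1 from by norm_num] at h
  show String.mk _ = String.mk _
  rw [h]
  simp [pvCapitalize]
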